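-- pv_equiv track=rewrite | github.com/asweigart/programmedpatterns | src/progpat/__init__.py | vis23
-- ===== SOURCE A (Python) =====
-- def vis23(n):  # DONE
--     # NOTE: Use 'O' for red, 'X' for green, 'M' for yellow.
--     # NOTE: It's okay to hard-code step 1
--     """
--     Exercise #23
--     1    2     3
--     .X   OOX   OOO
--     OXM  OOX   OOO
--          OOX   OOO
--          OOXM  OOOX
--                OOOX
--                OOOX
--                OOOX
--                OOOX
--                OOOXM
--
--     Number of Os, Xs, Ms:
--     4    13    34"""
--     if n == 1:
--         return '.X\nOXM'
--
--     result = ''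
--
--     for i in range(n ** 2):
--         result += 'O' * n
--
--         if i >= n ** 2 - (n * 2):
--             result += 'X'
--
--         if i == n ** 2 - 1:
--             result += 'M\n'
--         else:
--             result += '\n'
--
--     return result
-- ===== SOURCE B (Python) =====
-- def vis23(n):
--     # Build the three line segments directly and join once: n*n - 2*n plain
--     # rows of 'O'*n, then 2*n - 1 rows carrying an 'X', then the 'XM' row.
--     if n == 1:
--         return '.X\nOXM'
--     row = 'O' * n
--     lines = [row] * (n * n - 2 * n) + [row + 'X'] * (2 * n - 1) + [row + 'XM']
--     return '\n'.join(lines) + '\n'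
-- ===== Notes on version B (the rewrite author's own statement) =====
-- stated objective: simpler
-- what changed: Replaces the per-line loop with in-loop branches by a closed-form construction (replicated line segments joined once); Pre_ excludes non-positive n, outside the exercise's domain of triangle sizes, where no output is specified and A's degenerate strings and B's are equally unspecified choices.
-- outside the precondition, e.g. on vis23(0): A returns '', B returns 'XM\n'; on vis23(-1): A returns 'M\n', B returns '\n\n\nXM\n'
import Mathlib
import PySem

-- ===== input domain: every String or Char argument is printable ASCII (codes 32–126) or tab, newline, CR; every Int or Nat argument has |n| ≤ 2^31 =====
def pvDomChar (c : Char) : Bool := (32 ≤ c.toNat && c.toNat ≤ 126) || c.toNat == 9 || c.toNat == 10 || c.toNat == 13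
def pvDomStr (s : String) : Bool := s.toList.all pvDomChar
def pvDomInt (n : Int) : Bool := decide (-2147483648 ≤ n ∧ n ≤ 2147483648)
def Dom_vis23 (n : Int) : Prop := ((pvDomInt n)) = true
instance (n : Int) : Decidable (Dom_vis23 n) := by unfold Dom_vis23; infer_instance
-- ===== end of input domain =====

-- B builds the three line segments by formula and joins once instead of branching
-- inside a per-line loop; objective: simpler.

-- ===== PORT A =====
-- string accumulation ported on List Char (PySem.Chars side), wrapped by String.ofList at the end
def vis23 (n : Int) : String :=
  if n = 1 then ".X\nOXM"
  else
    String.ofList <|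
      (PySem.List.pyRange 0 (n ^ 2)).foldl (fun result i =>
        let result := result ++ PySem.List.pyRepeat ['O'] n
        let result := if n ^ 2 - (n * 2) ≤ i then result ++ ['X'] else result
        if i = n ^ 2 - 1 then result ++ ['M', '\n'] else result ++ ['\n']) []

-- ===== PORT B =====
def vis23_alt (n : Int) : String :=
  if n = 1 then ".X\nOXM"
  else
    let row := PySem.List.pyRepeat ['O'] n
    let lines := PySem.List.pyRepeat [row] (n * n - 2 * n)
                  ++ PySem.List.pyRepeat [row ++ ['X']] (2 * n - 1)
                  ++ [row ++ ['X', 'M']]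
    String.ofList (PySem.Chars.join ['\n'] lines ++ ['\n'])

-- ===== PRECONDITION & SPEC =====
-- Pre_ excludes non-positive n, outside the exercise's domain of triangle sizes: no output is
-- specified there, and A's degenerate strings (empty for n = 0, blank rows with a final M for
-- negative n) and B's are equally unspecified choices.
def Pre_vis23 (n : Int) : Prop := 1 ≤ n
instance (n : Int) : Decidable (Pre_vis23 n) := by unfold Pre_vis23; infer_instance
def pvWitness_vis23 : Int := (3)
def Spec_vis23 (n : Int) (out : String) : Prop := out = vis23_alt n
instance (n : Int) (out : String) : Decidable (Spec_vis23 n out) := by unfold Spec_vis23; infer_instance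

-- ===== CLAIM (what is proved, stated in full; the proofs are below) =====
def Claim_equal_vis23 : Prop := ∀ (n : Int), Dom_vis23 n → Pre_vis23 n → Spec_vis23 n (vis23 n)

-- ===== LEMMAS AND PROOFS =====

-- the line A's loop body appends at index i
def lineA (n i : Int) : List Char :=
  PySem.List.pyRepeat ['O'] n
    ++ (if n ^ 2 - (n * 2) ≤ i then ['X'] else [])
    ++ (if i = n ^ 2 - 1 then ['M', '\n'] else ['\n'])

theorem map_const_replicate {α β : Type} (f : α → β) (l : List α) (c : β)
    (h : ∀ x ∈ l, f x = c) : l.map f = List.replicate l.length c := by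
  induction l with
  | nil => rfl
  | cons a t ih =>
      simp [List.replicate_succ, h a (by simp), ih fun x hx => h x (by simp [hx])]

theorem join_newline_flatten (lines : List (List Char)) (hne : lines ≠ []) :
    PySem.Chars.join ['\n'] lines ++ ['\n'] = (lines.map (· ++ ['\n'])).flatten := by
  induction lines with
  | nil => exact absurd rfl hne
  | cons a t ih =>
      cases t with
      | nil => simp [PySem.Chars.join_singleton]
      | cons b r =>
          rw [PySem.Chars.join_cons_cons]
          simp only [List.map_cons, List.flatten_cons] at *
          rw [List.append_assoc, List.append_assoc, ih (by simp)]
          simp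

theorem vis23_spec' (n : Int) (hn : 1 ≤ n) : vis23 n = vis23_alt n := by
  by_cases h1 : n = 1
  · simp [vis23, vis23_alt, h1]
  · have hn2 : 2 ≤ n := by omega
    have hsq : n ^ 2 = n * n := by ring
    rw [vis23, vis23_alt, if_neg h1, if_neg h1]
    simp only [hsq]
    set total := n * n with htot
    have h2n : 2 * n ≤ total := by nlinarith
    set row : List Char := PySem.List.pyRepeat ['O'] n with hrow
    set plain : Int := total - 2 * n with hplain
    -- A's fold = flatten of the per-index lines
    have hfold :
        (PySem.List.pyRange 0 total).foldl (fun result i =>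
          let result := result ++ PySem.List.pyRepeat ['O'] n
          let result := if total - (n * 2) ≤ i then result ++ ['X'] else result
          if i = total - 1 then result ++ ['M', '\n'] else result ++ ['\n']) []
        = (PySem.List.pyRange 0 total).flatMap (lineA n) := by
      have hfm := PySem.List.foldl_append_eq_flatMap (lineA n) (PySem.List.pyRange 0 total) []
      simp only [List.nil_append] at hfm
      rw [← hfm]
      apply PySem.List.foldl_congr_mem
      intro acc x _
      simp only [lineA, hsq]
      split_ifs <;> simp
    rw [hfold]
    have hb1 : (0 : Int) ≤ plain := by omega
    have hb2 : plain ≤ total - 1 := by omega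
    rw [PySem.List.pyRange_one_append 0 plain total hb1 (by omega),
        PySem.List.pyRange_one_append plain (total - 1) total hb2 (by omega)]
    -- segment values
    have hseg1 : ∀ i ∈ PySem.List.pyRange 0 plain, lineA n i = row ++ ['\n'] := by
      intro i hi
      rw [PySem.List.mem_pyRange_one] at hi
      rw [lineA, hsq, if_neg (by omega), if_neg (by omega)]
      simp [hrow, PySem.List.pyRepeat_singleton]
    have hseg2 : ∀ i ∈ PySem.List.pyRange plain (total - 1),
        lineA n i = row ++ ['X', '\n'] := by
      intro i hi
      rw [PySem.List.mem_pyRange_one] at hi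
      rw [lineA, hsq, if_pos (by omega), if_neg (by omega)]
      simp [hrow, PySem.List.pyRepeat_singleton]
    have hseg3 : ∀ i ∈ PySem.List.pyRange (total - 1) total,
        lineA n i = row ++ ['X', 'M', '\n'] := by
      intro i hi
      rw [PySem.List.mem_pyRange_one] at hi
      have hieq : i = total - 1 := by omega
      rw [lineA, hsq, if_pos (by omega), hieq, if_pos rfl]
      simp [hrow, PySem.List.pyRepeat_singleton]
    have hmapseg : ∀ (a b : Int) (c : List Char),
        (∀ i ∈ PySem.List.pyRange a b, lineA n i = c) →
        (PySem.List.pyRange a b).flatMap (lineA n)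
          = (List.replicate (b - a).toNat c).flatten := by
      intro a b c hc
      rw [List.flatMap_def, map_const_replicate _ _ _ hc,
          PySem.List.length_pyRange_one]
    rw [List.flatMap_append, List.flatMap_append,
        hmapseg _ _ _ hseg1, hmapseg _ _ _ hseg2, hmapseg _ _ _ hseg3]
    -- B's side: join into flatten of the same replicated lines
    rw [join_newline_flatten _ (by simp)]
    congr 1
    rw [PySem.List.pyRepeat_singleton, PySem.List.pyRepeat_singleton]
    simp only [List.map_append, List.map_replicate, List.map_cons, List.map_nil,
      List.flatten_append]
    have e0 : (plain - 0).toNat = plain.toNat := by omega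
    have e1 : (total - 1 - plain).toNat = (2 * n - 1).toNat := by omega
    have e2 : (total - (total - 1)).toNat = 1 := by omega
    rw [e0, e1, e2]
    simp [List.append_assoc]

-- ===== VERDICT (by name: the statement is the Claim_ definition above) =====
theorem vis23_spec : Claim_equal_vis23 := by
  intro n _ hpre
  exact vis23_spec' n hpre
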